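-- pv_equiv track=rewrite | github.com/nicolasn59/Beecrowd | Python/AD-HOC/2296 Trilhas.py | find_easy_trail
-- ===== SOURCE A (Python) =====
-- def calculate_effort(altitude):
--     effort = 0
--     for i in range(1, len(altitude)):
--         elevation = altitude[i] - altitude[i -1]
--         if elevation > 0:
--             effort += elevation
--     return effort
--
-- def find_easy_trail(trails):
--     min_effort = float('inf')
--     best_trail = -1
--
--     for index, altitude in enumerate(trails):
--         effort = min(calculate_effort(altitude), calculate_effort(altitude[::-1]))
--         if effort < min_effort:
--             min_effort = effort
--             best_trail = index + 1
--     return best_trail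
-- ===== SOURCE B (Python) =====
-- def find_easy_trail(trails):
--     if not trails:
--         return -1
--     efforts = []
--     for altitude in trails:
--         ascent = sum(max(b - a, 0) for a, b in zip(altitude, altitude[1:]))
--         net = altitude[-1] - altitude[0] if altitude else 0
--         # total descent = ascent - net, by the telescoping identity sum(deltas) = net
--         efforts.append(min(ascent, ascent - net))
--     return efforts.index(min(efforts)) + 1
-- ===== Notes on version B (the rewrite author's own statement) =====
-- stated objective: alternative
-- what changed: B computes only the ascent of each trail and derives its descent in closed form from the telescoping identity descent = ascent - (last - first) (so no reversed copy and no second summing pass), and it selects the winner by min() plus list.index() over a precomputed effort list instead of A's running-minimum fold with an infinity sentinel.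
import Mathlib
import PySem

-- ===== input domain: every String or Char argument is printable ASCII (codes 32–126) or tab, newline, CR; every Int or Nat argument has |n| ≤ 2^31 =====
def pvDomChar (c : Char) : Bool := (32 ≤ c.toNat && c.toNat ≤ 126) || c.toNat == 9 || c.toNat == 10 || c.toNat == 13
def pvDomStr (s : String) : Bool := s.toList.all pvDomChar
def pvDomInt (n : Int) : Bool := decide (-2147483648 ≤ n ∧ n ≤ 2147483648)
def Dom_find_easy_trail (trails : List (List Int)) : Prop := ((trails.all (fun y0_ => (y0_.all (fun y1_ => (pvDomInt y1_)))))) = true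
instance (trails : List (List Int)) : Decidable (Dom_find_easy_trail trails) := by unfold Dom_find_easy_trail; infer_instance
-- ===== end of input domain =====

-- B computes only each trail's ascent and obtains the descent in closed form from the
-- telescoping identity descent = ascent - (last - first), then picks the winner by
-- min() + list.index() over the effort list instead of a running-minimum fold (objective: alternative).

-- ===== PORT A =====
def calculate_effort (altitude : List Int) : Int :=
  (PySem.List.pyRange 1 (altitude.length : Int)).foldl
    (fun effort i =>
      let elevation := PySem.List.pyGetD altitude i 0 - PySem.List.pyGetD altitude (i - 1) 0
      if elevation > 0 then effort + elevation else effort) 0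

def find_easy_trail (trails : List (List Int)) : Int :=
  -- min_effort = float('inf') is modelled as `none` (smaller than nothing); altitude[::-1]
  -- is the reversed list.
  ((PySem.List.enumerate trails).foldl
    (fun (st : Option Int × Int) (p : Int × List Int) =>
      let effort := min (calculate_effort p.2) (calculate_effort p.2.reverse)
      match st.1 with
      | none => (some effort, p.1 + 1)
      | some m => if effort < m then (some effort, p.1 + 1) else st)
    (none, -1)).2

-- ===== PORT B =====
def trail_effort (altitude : List Int) : Int :=
  -- sum(max(b - a, 0) for a, b in zip(altitude, altitude[1:])); altitude[1:] = drop 1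
  let ascent := ((altitude.zip (altitude.drop 1)).map (fun ab => max (ab.2 - ab.1) 0)).sum
  let net := if altitude.isEmpty then 0
             else PySem.List.pyGetD altitude (-1) 0 - PySem.List.pyGetD altitude 0 0
  min ascent (ascent - net)

def find_easy_trail_alt (trails : List (List Int)) : Int :=
  if trails.isEmpty then -1
  else
    let efforts := trails.map trail_effort
    -- efforts.index(min(efforts)) + 1; both `none` branches are unreachable (efforts ≠ [])
    match PySem.List.min? efforts (fun x => x) with
    | none => -1
    | some m =>
      match PySem.List.index? efforts m with
      | none => -1
      | some k => (k : Int) + 1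

-- ===== PRECONDITION & SPEC =====
def Spec_find_easy_trail (trails : List (List Int)) (out : Int) : Prop := out = find_easy_trail_alt trails
instance (trails : List (List Int)) (out : Int) : Decidable (Spec_find_easy_trail trails out) := by unfold Spec_find_easy_trail; infer_instance

-- ===== CLAIM =====
def Claim_equal_find_easy_trail : Prop := ∀ (trails : List (List Int)), Dom_find_easy_trail trails → Spec_find_easy_trail trails (find_easy_trail trails)

-- ===== LEMMAS AND PROOFS =====

-- contribution of one adjacent pair to an ascent/descent sum
def pvPos (d : Int) : Int := if d > 0 then d else 0

def pvUp (alt : List Int) : Int :=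
  ∑ k ∈ Finset.range (alt.length - 1), pvPos (alt.getD (k + 1) 0 - alt.getD k 0)
def pvDown (alt : List Int) : Int :=
  ∑ k ∈ Finset.range (alt.length - 1), pvPos (alt.getD k 0 - alt.getD (k + 1) 0)

def pvEffA (alt : List Int) : Int :=
  min (calculate_effort alt) (calculate_effort alt.reverse)

theorem pv_listsum_range (n : Nat) (f : Nat → Int) :
    ((List.range n).map f).sum = ∑ k ∈ Finset.range n, f k := by
  induction n with
  | zero => simp
  | succ n ih => rw [List.range_succ, Finset.sum_range_succ]; simp [ih]

theorem pv_foldl_ite_add {β : Type} (l : List β) (g : β → Int) (a : Int) :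
    l.foldl (fun e x => if g x > 0 then e + g x else e) a
      = a + (l.map (fun x => pvPos (g x))).sum := by
  induction l generalizing a with
  | nil => simp
  | cons x t ih =>
    simp only [List.foldl_cons, List.map_cons, List.sum_cons, ih, pvPos]
    split_ifs <;> ring

theorem pv_calc_sum (alt : List Int) : calculate_effort alt = pvUp alt := by
  unfold calculate_effort pvUp
  rw [PySem.List.pyRange_one, List.foldl_map]
  rw [pv_foldl_ite_add (List.range ((alt.length : Int) - 1).toNat)
        (fun k => PySem.List.pyGetD alt (1 + (k : Int)) 0
                  - PySem.List.pyGetD alt (1 + (k : Int) - 1) 0) 0]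
  rw [zero_add, pv_listsum_range]
  have hn : ((alt.length : Int) - 1).toNat = alt.length - 1 := by omega
  rw [hn]
  apply Finset.sum_congr rfl
  intro k _
  have h1 : (1 : Int) + (k : Int) = ((k + 1 : Nat) : Int) := by push_cast; ring
  rw [h1]
  rw [PySem.List.pyGetD_natCast]
  have h3 : ((k + 1 : Nat) : Int) - 1 = ((k : Nat) : Int) := by push_cast; ring
  rw [h3, PySem.List.pyGetD_natCast]

theorem pv_getD_reverse (alt : List Int) (j : Nat) (h : j < alt.length) :
    alt.reverse.getD j 0 = alt.getD (alt.length - 1 - j) 0 := by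
  rw [List.getD_eq_getElem _ _ (by simpa), List.getD_eq_getElem _ _ (by omega),
    List.getElem_reverse]

theorem pv_calc_rev (alt : List Int) : calculate_effort alt.reverse = pvDown alt := by
  rw [pv_calc_sum, pvUp, pvDown, List.length_reverse]
  rw [← Finset.sum_range_reflect]
  apply Finset.sum_congr rfl
  intro k hk
  rw [Finset.mem_range] at hk
  have hlen : 1 ≤ alt.length := by omega
  have e1 : alt.length - 1 - 1 - k + 1 = alt.length - 1 - k := by omega
  rw [e1]
  rw [pv_getD_reverse alt (alt.length - 1 - k) (by omega),
      pv_getD_reverse alt (alt.length - 1 - 1 - k) (by omega)]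
  have e2 : alt.length - 1 - (alt.length - 1 - k) = k := by omega
  have e3 : alt.length - 1 - (alt.length - 1 - 1 - k) = k + 1 := by omega
  rw [e2, e3]

theorem pv_zip_sum (alt : List Int) (g : Int → Int → Int) :
    ((alt.zip (alt.drop 1)).map (fun ab => g ab.1 ab.2)).sum
      = ∑ k ∈ Finset.range (alt.length - 1), g (alt.getD k 0) (alt.getD (k + 1) 0) := by
  rw [← pv_listsum_range]
  congr 1
  apply List.ext_getElem
  · simp
  · intro k h1 h2
    have hz : k < (alt.zip (alt.drop 1)).length := by simpa using h1
    have hk : k < alt.length - 1 := by simp at hz; omega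
    simp only [List.getElem_map, List.getElem_zip, List.getElem_range, List.getElem_drop]
    rw [List.getD_eq_getElem _ _ (by omega), List.getD_eq_getElem _ _ (by omega)]
    simp only [show 1 + k = k + 1 from Nat.add_comm 1 k]

theorem pv_pos_eq_max (d : Int) : max d 0 = pvPos d := by
  unfold pvPos; rw [max_def]; split_ifs <;> omega

theorem pv_pos_neg (x y : Int) : pvPos (x - y) = pvPos (y - x) - (y - x) := by
  unfold pvPos; split_ifs <;> omega

-- net altitude change of a trail (0 for the empty trail)
def pvNet (alt : List Int) : Int :=
  if alt.isEmpty then 0 else alt.getD (alt.length - 1) 0 - alt.getD 0 0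

theorem pv_down_eq (alt : List Int) : pvDown alt = pvUp alt - pvNet alt := by
  cases alt with
  | nil => simp [pvDown, pvUp, pvNet]
  | cons a t =>
    unfold pvDown pvUp pvNet
    have : ∀ k ∈ Finset.range ((a :: t).length - 1),
        pvPos ((a :: t).getD k 0 - (a :: t).getD (k + 1) 0)
          = pvPos ((a :: t).getD (k + 1) 0 - (a :: t).getD k 0)
            - ((a :: t).getD (k + 1) 0 - (a :: t).getD k 0) := by
      intro k _; exact pv_pos_neg _ _
    rw [Finset.sum_congr rfl this, Finset.sum_sub_distrib,
        Finset.sum_range_sub (fun k => (a :: t).getD k 0) ((a :: t).length - 1)]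
    simp

theorem pv_pyGetD_last (alt : List Int) (h : alt ≠ []) :
    PySem.List.pyGetD alt (-1) 0 = alt.getD (alt.length - 1) 0 := by
  have hl : 0 < alt.length := List.length_pos_iff.mpr h
  simp only [PySem.List.pyGetD, PySem.List.pyGet?, PySem.List.pyIdx?]
  split_ifs with h1 h2 <;> try omega
  · have h3 : alt.length - (-(-1 : Int)).toNat = alt.length - 1 := by omega
    rw [h3, List.getD_eq_getElem _ _ (by omega)]
    simp [List.getElem?_eq_getElem (by omega : alt.length - 1 < alt.length)]

theorem pv_pyGetD_zero (alt : List Int) (h : alt ≠ []) :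
    PySem.List.pyGetD alt 0 0 = alt.getD 0 0 := by
  have hl : 0 < alt.length := List.length_pos_iff.mpr h
  simp only [PySem.List.pyGetD, PySem.List.pyGet?, PySem.List.pyIdx?]
  split_ifs with h1 h2 <;> try omega
  rw [List.getD_eq_getElem _ _ hl]
  simp [List.getElem?_eq_getElem hl]

theorem pv_eff_eq (alt : List Int) : trail_effort alt = pvEffA alt := by
  unfold trail_effort pvEffA
  rw [pv_calc_sum, pv_calc_rev]
  have hasc : ((alt.zip (alt.drop 1)).map (fun ab => max (ab.2 - ab.1) 0)).sum = pvUp alt := by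
    rw [pv_zip_sum alt (fun a b => max (b - a) 0)]
    unfold pvUp
    exact Finset.sum_congr rfl (fun k _ => pv_pos_eq_max _)
  have hnet : (if alt.isEmpty then 0
      else PySem.List.pyGetD alt (-1) 0 - PySem.List.pyGetD alt 0 0) = pvNet alt := by
    unfold pvNet
    cases alt with
    | nil => rfl
    | cons a t =>
      simp only [List.isEmpty_cons, if_false, Bool.false_eq_true]
      rw [pv_pyGetD_last _ (by simp), pv_pyGetD_zero _ (by simp)]
  simp only [hasc, hnet, pv_down_eq]

-- A's selection loop, specialised to a list of precomputed efforts
def pvStep (st : Option Int × Int) (p : Int × Int) : Option Int × Int :=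
  match st.1 with
  | none => (some p.2, p.1 + 1)
  | some m => if p.2 < m then (some p.2, p.1 + 1) else st

theorem pv_enum_map (l : List (List Int)) :
    ∀ (s : Int) (st : Option Int × Int),
    (PySem.List.enumerate l s).foldl (fun st p => pvStep st (p.1, pvEffA p.2)) st
      = (PySem.List.enumerate (l.map pvEffA) s).foldl pvStep st := by
  induction l with
  | nil => intro s st; simp [PySem.List.enumerate]
  | cons x t ih =>
    intro s st
    rw [List.map_cons, PySem.List.enumerate_cons, PySem.List.enumerate_cons,
        List.foldl_cons, List.foldl_cons, ih]

theorem pv_foldl_min_le (t : List Int) : ∀ (x : Int), t.foldl min x ≤ x := by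
  induction t with
  | nil => intro x; simp
  | cons e t ih =>
    intro x
    calc (e :: t).foldl min x = t.foldl min (min x e) := by rw [List.foldl_cons]
    _ ≤ min x e := ih _
    _ ≤ x := min_le_left _ _

theorem pv_foldl_min_mem (t : List Int) :
    ∀ (x : Int), t.foldl min x = x ∨ t.foldl min x ∈ t := by
  induction t with
  | nil => intro x; simp
  | cons e t ih =>
    intro x
    rw [List.foldl_cons]
    rcases ih (min x e) with h | h
    · rw [h, min_def]
      split_ifs with hle
      · left; rfl
      · right; simp
    · right; simp [h]

theorem pv_selectA (t : List Int) :
    ∀ (m b j : Int),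
    (PySem.List.enumerate t j).foldl pvStep (some m, b) =
      if t.foldl min m < m
      then (some (t.foldl min m),
            j + (((PySem.List.index? t (t.foldl min m)).getD 0 : Nat) : Int) + 1)
      else (some m, b) := by
  induction t with
  | nil => intro m b j; simp [PySem.List.enumerate]
  | cons e t ih =>
    intro m b j
    rw [PySem.List.enumerate_cons, List.foldl_cons]
    by_cases he : e < m
    · have hstep : pvStep (some m, b) (j, e) = (some e, j + 1) := by simp [pvStep, he]
      rw [hstep, ih e (j + 1) (j + 1)]
      have hfold : (e :: t).foldl min m = t.foldl min e := by
        rw [List.foldl_cons, min_eq_right (le_of_lt he)]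
      by_cases h2 : t.foldl min e < e
      · have hμm : (e :: t).foldl min m < m := by rw [hfold]; omega
        have hne : e ≠ t.foldl min e := by omega
        have hmem : t.foldl min e ∈ t := by
          rcases pv_foldl_min_mem t e with h | h
          · omega
          · exact h
        obtain ⟨k, hk⟩ := (PySem.List.index?_isSome_iff t (t.foldl min e)).mpr hmem
          |> Option.isSome_iff_exists.mp
        rw [if_pos h2, if_pos hμm, hfold,
            PySem.List.index?_cons_of_ne t hne, hk]
        simp only [Option.map_some, Option.getD_some, Prod.mk.injEq, true_and]
        push_cast; ring
      · have heq : t.foldl min e = e := le_antisymm (pv_foldl_min_le t e) (by omega)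
        rw [if_neg h2, hfold, heq, if_pos he, PySem.List.index?_cons_self]
        simp only [Option.getD_some, Nat.cast_zero, Prod.mk.injEq, true_and]
        ring
    · have hstep : pvStep (some m, b) (j, e) = (some m, b) := by simp [pvStep, he]
      rw [hstep, ih m b (j + 1)]
      have hfold : (e :: t).foldl min m = t.foldl min m := by
        rw [List.foldl_cons, min_eq_left (by omega)]
      by_cases h2 : t.foldl min m < m
      · have hne : e ≠ t.foldl min m := by omega
        have hmem : t.foldl min m ∈ t := by
          rcases pv_foldl_min_mem t m with h | h
          · omega
          · exact h
        obtain ⟨k, hk⟩ := (PySem.List.index?_isSome_iff t (t.foldl min m)).mpr hmem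
          |> Option.isSome_iff_exists.mp
        rw [if_pos h2, if_pos (by rw [hfold]; exact h2), hfold,
            PySem.List.index?_cons_of_ne t hne, hk]
        simp only [Option.map_some, Option.getD_some, Prod.mk.injEq, true_and]
        push_cast; ring
      · rw [if_neg h2, if_neg (by rw [hfold]; exact h2)]

-- ===== VERDICT =====
theorem find_easy_trail_spec : Claim_equal_find_easy_trail := by
  intro trails _
  unfold Spec_find_easy_trail find_easy_trail find_easy_trail_alt
  cases trails with
  | nil => simp [PySem.List.enumerate]
  | cons x rest =>
    have hbody :
        ((PySem.List.enumerate (x :: rest)).foldl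
          (fun (st : Option Int × Int) (p : Int × List Int) =>
            let effort := min (calculate_effort p.2) (calculate_effort p.2.reverse)
            match st.1 with
            | none => (some effort, p.1 + 1)
            | some m => if effort < m then (some effort, p.1 + 1) else st)
          (none, -1))
        = ((PySem.List.enumerate (x :: rest)).foldl
            (fun st p => pvStep st (p.1, pvEffA p.2)) (none, -1)) := rfl
    rw [hbody, pv_enum_map]
    have heffs : (x :: rest).map trail_effort = (x :: rest).map pvEffA := by
      have hfun : trail_effort = pvEffA := funext pv_eff_eq
      rw [hfun]
    simp only [List.isEmpty_cons, if_false, Bool.false_eq_true, heffs]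
    rw [List.map_cons, PySem.List.enumerate_cons, List.foldl_cons]
    have hstep0 : pvStep (none, -1) (0, pvEffA x) = (some (pvEffA x), 1) := by
      simp [pvStep]
    rw [hstep0, show (0 : Int) + 1 = 1 from rfl,
        pv_selectA (rest.map pvEffA) (pvEffA x) 1 1,
        PySem.List.min?_id_cons]
    by_cases h2 : (rest.map pvEffA).foldl min (pvEffA x) < pvEffA x
    · have hne : pvEffA x ≠ (rest.map pvEffA).foldl min (pvEffA x) := by omega
      have hmem : (rest.map pvEffA).foldl min (pvEffA x) ∈ rest.map pvEffA := by
        rcases pv_foldl_min_mem (rest.map pvEffA) (pvEffA x) with h | h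
        · omega
        · exact h
      obtain ⟨k, hk⟩ := (PySem.List.index?_isSome_iff _ _).mpr hmem
        |> Option.isSome_iff_exists.mp
      rw [if_pos h2]
      dsimp only
      rw [PySem.List.index?_cons_of_ne (rest.map pvEffA) hne, hk]
      simp only [Option.map_some, Option.getD_some]
      push_cast; ring
    · have heq : (rest.map pvEffA).foldl min (pvEffA x) = pvEffA x :=
        le_antisymm (pv_foldl_min_le _ _) (by omega)
      rw [if_neg h2, heq]
      dsimp only
      rw [PySem.List.index?_cons_self]
      norm_num
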